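-- pv_equiv track=rewrite | github.com/UKGANG/Leetcode | greedy/SeatingArrangements.py | minOverallAwkwardness
-- ===== SOURCE A (Python) =====
-- import heapq
--
-- def minOverallAwkwardness(arr):
--     heapq.heapify(arr)
--     cache = [heapq.heappop(arr)]
--
--     res = 0
--     while arr:
--         head, tail = cache[0], cache[-1]
--         curr = heapq.heappop(arr)
--         if head < tail:
--             res = max(res, curr - head)
--             cache.insert(0, curr)
--         else:
--             res = max(res, curr - tail)
--             cache.append(curr)
--     return res
-- ===== SOURCE B (Python) =====
-- def minOverallAwkwardness(arr):
--     # Build the optimal circular seating explicitly (ascending on one side of the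
--     # circle, descending on the other), then measure the maximum awkwardness
--     # between adjacent seats around the circle.
--     evens, odds = [], []
--     even = True
--     for x in sorted(arr):
--         if even:
--             evens.append(x)
--         else:
--             odds.append(x)
--         even = not even
--     ring = evens + odds[::-1]
--     prev = ring[-1]
--     res = 0
--     for x in ring:
--         d = abs(x - prev)
--         if d > res:
--             res = d
--         prev = x
--     return res
-- ===== Notes on version B (the rewrite author's own statement) =====
-- stated objective: faster
-- what changed: Instead of simulating A's heap-pop loop with O(n) front insertions into a growing two-ended cache, B explicitly constructs the optimal circular seating (sorted values split into the two sides of the circle, one ascending, one descending) and then directly measures the maximum absolute difference between adjacent seats around the circle in one pass.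
import Mathlib
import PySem

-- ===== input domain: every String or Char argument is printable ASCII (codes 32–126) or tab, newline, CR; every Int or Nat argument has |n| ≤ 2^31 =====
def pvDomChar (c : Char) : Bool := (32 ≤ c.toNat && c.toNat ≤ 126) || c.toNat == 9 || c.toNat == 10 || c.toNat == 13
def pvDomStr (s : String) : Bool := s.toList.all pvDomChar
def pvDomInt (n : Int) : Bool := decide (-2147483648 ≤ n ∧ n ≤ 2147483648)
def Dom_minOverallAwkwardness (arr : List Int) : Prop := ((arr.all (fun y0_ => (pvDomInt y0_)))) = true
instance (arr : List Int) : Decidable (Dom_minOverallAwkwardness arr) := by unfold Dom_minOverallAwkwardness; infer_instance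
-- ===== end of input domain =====

-- B builds the optimal circular seating explicitly (sorted values, one side ascending, the
-- other descending) and measures the max adjacent awkwardness around the circle, instead of
-- A's heap-pop loop with front insertions into a cache. Python A mutates arr in place
-- (heapify + pops empty it), B does not; the claim is about the return value only.

-- ===== PORT A =====
-- heapq.heapify followed by popping every element yields the values of arr in nondecreasing
-- order; this value sequence is exactly PySem.List.sorted arr (exact on values — only the
-- values are used by A, never heap-internal order of equal elements).
def minOverallAwkwardnessGoA : List Int → List Int → Int → Int
  | _cache, [], res => res
  | cache, curr :: rest, res =>
    let head := cache.headD 0      -- cache[0]; cache is never empty in A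
    let tail := cache.getLastD 0   -- cache[-1]
    if head < tail then
      minOverallAwkwardnessGoA (curr :: cache) rest (max res (curr - head))
    else
      minOverallAwkwardnessGoA (cache ++ [curr]) rest (max res (curr - tail))

def minOverallAwkwardness (arr : List Int) : Int :=
  match PySem.List.sorted arr (fun x => x) false with
  | [] => 0            -- Python raises IndexError here (excluded by Pre_)
  | a0 :: rest => minOverallAwkwardnessGoA [a0] rest 0

-- ===== PORT B =====
-- the parity loop building evens/odds (even flag toggles each step)
def pvSplitLoop : List Int → List Int → List Int → Bool → List Int × List Int
  | [], e, o, _ => (e, o)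
  | x :: l, e, o, ev =>
    if ev then pvSplitLoop l (e ++ [x]) o false else pvSplitLoop l e (o ++ [x]) true

-- the measuring loop around the ring: res = max(res, abs(x - prev)), prev = x
def pvRingLoop : Int → List Int → Int → Int
  | _, [], res => res
  | prev, x :: l, res => pvRingLoop x l (if |x - prev| > res then |x - prev| else res)

def minOverallAwkwardness_alt (arr : List Int) : Int :=
  let s := PySem.List.sorted arr (fun x => x) false
  let eo := pvSplitLoop s [] [] true
  let ring := eo.1 ++ ((PySem.List.slice? eo.2 none none (-1)).getD [])  -- odds[::-1] never fails
  match PySem.List.pyGet? ring (-1) with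
  | none => 0          -- ring[-1]: IndexError on the empty list (excluded by Pre_)
  | some prev => pvRingLoop prev ring 0

-- ===== PRECONDITION & SPEC =====
-- Pre_ excludes the empty list, on which A (and B alike) raises IndexError.
def Pre_minOverallAwkwardness (arr : List Int) : Prop := arr ≠ []
instance (arr : List Int) : Decidable (Pre_minOverallAwkwardness arr) := by unfold Pre_minOverallAwkwardness; infer_instance
def pvWitness_minOverallAwkwardness : List Int := [3, 1, 2]

def Spec_minOverallAwkwardness (arr : List Int) (out : Int) : Prop := out = minOverallAwkwardness_alt arr
instance (arr : List Int) (out : Int) : Decidable (Spec_minOverallAwkwardness arr out) := by unfold Spec_minOverallAwkwardness; infer_instance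

-- ===== CLAIM (what is proved, stated in full; the proofs are below) =====
def Claim_equal_minOverallAwkwardness : Prop := ∀ (arr : List Int), Dom_minOverallAwkwardness arr → Pre_minOverallAwkwardness arr → Spec_minOverallAwkwardness arr (minOverallAwkwardness arr)

-- ===== LEMMAS AND PROOFS =====

-- A's loop only ever reads the two ends of `cache`: abstract the state to that pair.
def pvGoPair : Int → Int → List Int → Int → Int
  | _h, _t, [], res => res
  | h, t, c :: rest, res =>
    if h < t then pvGoPair c t rest (max res (c - h))
    else pvGoPair h c rest (max res (c - t))

lemma goA_eq_goPair : ∀ (rest : List Int) (cache : List Int) (res : Int), cache ≠ [] →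
    minOverallAwkwardnessGoA cache rest res
      = pvGoPair (cache.headD 0) (cache.getLastD 0) rest res := by
  intro rest
  induction rest with
  | nil => intro cache res _; simp [minOverallAwkwardnessGoA, pvGoPair]
  | cons c rs ih =>
    intro cache res hne
    obtain ⟨x, cache', rfl⟩ : ∃ x xs, cache = x :: xs := by
      cases cache with
      | nil => exact absurd rfl hne
      | cons a b => exact ⟨a, b, rfl⟩
    simp only [minOverallAwkwardnessGoA, pvGoPair]
    split_ifs with h
    · rw [ih _ _ (by simp)]
      simp
    · rw [ih _ _ (by simp)]
      cases cache' with
      | nil => simp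
      | cons y ys =>
        have hl : (y :: (ys ++ [c])).getLast?.getD 0 = c := by
          rw [← List.cons_append, List.getLast?_concat]; rfl
        simp [List.getLastD_eq_getLast?, hl]

-- the two-back chain gaps A's pair loop accumulates, as a list
def pvGaps2 : Int → Int → List Int → List Int
  | _, _, [] => []
  | p2, p1, c :: l => (c - p2) :: pvGaps2 p1 c l

-- On a sorted run with both chain ends below every upcoming element, the pair loop
-- subtracts alternately min/max of the two previous values: it folds pvGaps2.
lemma goPair_eq_fold : ∀ (rs : List Int) (h t res : Int),
    rs.Pairwise (· ≤ ·) → (∀ c ∈ rs, max h t ≤ c) →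
    pvGoPair h t rs res = (pvGaps2 (min h t) (max h t) rs).foldl max res := by
  intro rs
  induction rs with
  | nil => intro h t res _ _; simp [pvGoPair, pvGaps2]
  | cons c rs ih =>
    intro h t res hpw hge
    have hc : max h t ≤ c := hge c (by simp)
    have hpw' : rs.Pairwise (· ≤ ·) := hpw.tail
    have hcr : ∀ d ∈ rs, c ≤ d := fun d hd => List.rel_of_pairwise_cons hpw hd
    simp only [pvGoPair, pvGaps2]
    split_ifs with hlt
    · -- h < t : min = h, max = t; next pair (c, t) with t ≤ c
      have ht : t ≤ c := le_of_max_le_right hc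
      rw [ih c t _ hpw' (fun d hd => max_le (hcr d hd) (ht.trans (hcr d hd)))]
      have h1 : min c t = t := min_eq_right ht
      have h2 : max c t = c := max_eq_left ht
      have h3 : min h t = h := min_eq_left hlt.le
      have h4 : max h t = t := max_eq_right hlt.le
      rw [h1, h2, h3, h4]
      simp [List.foldl]
    · -- t ≤ h : min = t, max = h; next pair (h, c) with h ≤ c
      rw [not_lt] at hlt
      have hh : h ≤ c := le_of_max_le_left hc
      rw [ih h c _ hpw' (fun d hd => max_le (hh.trans (hcr d hd)) (hcr d hd))]
      have h1 : min h c = h := min_eq_left hh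
      have h2 : max h c = c := max_eq_right hh
      have h3 : min h t = t := min_eq_right hlt
      have h4 : max h t = h := max_eq_left hlt
      rw [h1, h2, h3, h4]
      simp [List.foldl]

-- B-side structural descriptions -----------------------------------------------------------

-- (evens, odds) of a list: elements at even / odd positions
def pvSplit : List Int → List Int × List Int
  | [] => ([], [])
  | x :: l => (x :: (pvSplit l).2, (pvSplit l).1)

lemma splitLoop_spec : ∀ (s e o : List Int),
    pvSplitLoop s e o true = (e ++ (pvSplit s).1, o ++ (pvSplit s).2)
    ∧ pvSplitLoop s e o false = (e ++ (pvSplit s).2, o ++ (pvSplit s).1) := by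
  intro s
  induction s with
  | nil => intro e o; simp [pvSplitLoop, pvSplit]
  | cons x l ih =>
    intro e o
    constructor
    · simp only [pvSplitLoop, if_pos, pvSplit, (ih (e ++ [x]) o).2]
      simp
    · simp only [pvSplitLoop, pvSplit, (ih e (o ++ [x])).1]
      simp

-- the seating circle: evens ascending, then odds descending
def pvRing (l : List Int) : List Int := (pvSplit l).1 ++ (pvSplit l).2.reverse

lemma pvRing_two_step (a b : Int) (l : List Int) :
    pvRing (a :: b :: l) = a :: pvRing l ++ [b] := by
  simp [pvRing, pvSplit]

-- adjacent absolute gaps along prev :: l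
def pvAdjGaps : Int → List Int → List Int
  | _, [] => []
  | p, x :: l => |x - p| :: pvAdjGaps x l

lemma ringLoop_eq_fold : ∀ (l : List Int) (p res : Int),
    pvRingLoop p l res = (pvAdjGaps p l).foldl max res := by
  intro l
  induction l with
  | nil => intro p res; simp [pvRingLoop, pvAdjGaps]
  | cons x l ih =>
    intro p res
    have hstep : (if |x - p| > res then |x - p| else res) = max res |x - p| := by
      rw [max_def]; split_ifs <;> omega
    simp only [pvRingLoop, pvAdjGaps, List.foldl, hstep, ih]

lemma adjGaps_snoc2 : ∀ (xs : List Int) (p y z : Int),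
    pvAdjGaps p (xs ++ [y, z]) = pvAdjGaps p (xs ++ [y]) ++ [|z - y|] := by
  intro xs
  induction xs with
  | nil => intro p y z; simp [pvAdjGaps]
  | cons x xs ih => intro p y z; simp [pvAdjGaps, ih]

lemma foldl_max_seed : ∀ (L : List Int) (r x : Int),
    L.foldl max (max r x) = max (L.foldl max r) x := by
  intro L
  induction L with
  | nil => intro r x; simp
  | cons a L ih =>
    intro r x
    simp only [List.foldl]
    rw [max_right_comm r x a, ih]

lemma foldl_max_concat (L : List Int) (r x : Int) :
    (L ++ [x]).foldl max r = L.foldl max (max r x) := by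
  rw [List.foldl_append, foldl_max_seed]
  simp

-- Core equality: walking the circle of l prefixed by p2 and closed by p1 measures exactly
-- the chain gaps pvGaps2 p2 p1 l, provided the seed already dominates p1 - p2.
lemma ring_gaps_eq : ∀ (n : Nat) (l : List Int), l.length ≤ n → l.Pairwise (· ≤ ·) →
    ∀ (p2 p1 r : Int), p2 ≤ p1 → (∀ x ∈ l, p1 ≤ x) → p1 - p2 ≤ r →
    (pvAdjGaps p2 (pvRing l ++ [p1])).foldl max r = (pvGaps2 p2 p1 l).foldl max r := by
  intro n
  induction n with
  | zero =>
    intro l hl _ p2 p1 r h21 _ hr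
    have hnil : l = [] := List.eq_nil_of_length_eq_zero (Nat.le_zero.mp hl)
    subst hnil
    simp only [pvRing, pvSplit, pvAdjGaps, pvGaps2, List.reverse_nil, List.append_nil,
      List.nil_append, List.foldl]
    rw [abs_of_nonneg (by omega : (0:Int) ≤ p1 - p2)]
    omega
  | succ n ih =>
    intro l hl hpw p2 p1 r h21 hge hr
    rcases l with _ | ⟨c, _ | ⟨d, l'⟩⟩
    · simp only [pvRing, pvSplit, pvAdjGaps, pvGaps2, List.reverse_nil, List.append_nil,
        List.nil_append, List.foldl]
      rw [abs_of_nonneg (by omega : (0:Int) ≤ p1 - p2)]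
      omega
    · have hc : p1 ≤ c := hge c (by simp)
      simp only [pvRing, pvSplit, List.reverse_nil, List.append_nil, List.nil_append,
        List.cons_append, pvAdjGaps, pvGaps2, List.foldl]
      rw [abs_of_nonneg (by omega : (0:Int) ≤ c - p2), abs_of_nonpos (by omega : p1 - c ≤ 0)]
      omega
    · have hc : p1 ≤ c := hge c (by simp)
      have hcd : c ≤ d := List.rel_of_pairwise_cons hpw (by simp)
      have hdl : ∀ x ∈ l', d ≤ x := fun x hx => List.rel_of_pairwise_cons hpw.tail hx
      have hpw' : l'.Pairwise (· ≤ ·) := hpw.tail.tail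
      rw [pvRing_two_step]
      have hshape : pvAdjGaps p2 ((c :: pvRing l' ++ [d]) ++ [p1])
          = (|c - p2| :: pvAdjGaps c (pvRing l' ++ [d])) ++ [|p1 - d|] := by
        have h1 : (c :: pvRing l' ++ [d]) ++ [p1] = c :: (pvRing l' ++ [d, p1]) := by simp
        rw [h1]
        simp only [pvAdjGaps]
        rw [adjGaps_snoc2]
        simp
      rw [hshape, foldl_max_concat]
      simp only [List.foldl]
      rw [abs_of_nonneg (by omega : (0:Int) ≤ c - p2),
          abs_of_nonpos (by omega : p1 - d ≤ 0), neg_sub]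
      have hlen : l'.length ≤ n := by simp at hl; omega
      rw [max_right_comm]
      rw [ih l' hlen hpw' c d (max (max r (c - p2)) (d - p1)) hcd hdl (by omega)]
      simp only [pvGaps2, List.foldl]

-- ===== VERDICT (by name: the statement is the Claim_ definition above) =====
theorem minOverallAwkwardness_spec : Claim_equal_minOverallAwkwardness := by
  intro arr _hdom hpre
  unfold Spec_minOverallAwkwardness minOverallAwkwardness minOverallAwkwardness_alt
  have hpw := PySem.List.sorted_pairwise (xs := arr) (key := fun x : Int => x)
  have hsne : PySem.List.sorted arr (fun x => x) false ≠ [] := by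
    rw [ne_eq, PySem.List.sorted_eq_nil_iff]; exact hpre
  cases hs : PySem.List.sorted arr (fun x => x) false with
  | nil => exact absurd hs hsne
  | cons a0 rest =>
    rw [hs] at hpw
    have hpw' : (a0 :: rest).Pairwise (· ≤ ·) := hpw
    simp only [(splitLoop_spec (a0 :: rest) [] []).1, List.nil_append,
      PySem.List.slice?_none_none_neg_one, Option.getD_some]
    rw [show (pvSplit (a0 :: rest)).1 ++ (pvSplit (a0 :: rest)).2.reverse
          = pvRing (a0 :: rest) from rfl]
    cases rest with
    | nil =>
      rw [show pvRing [a0] = [a0] by simp [pvRing, pvSplit], PySem.List.pyGet?_neg_one]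
      simp [minOverallAwkwardnessGoA, pvRingLoop]
    | cons b l =>
      have hab : a0 ≤ b := List.rel_of_pairwise_cons hpw' (by simp)
      have hbl : ∀ x ∈ l, b ≤ x := fun x hx => List.rel_of_pairwise_cons hpw'.tail hx
      rw [pvRing_two_step]
      have hlast : PySem.List.pyGet? (a0 :: pvRing l ++ [b]) (-1) = some b := by
        rw [PySem.List.pyGet?_neg_one,
            show a0 :: pvRing l ++ [b] = (a0 :: pvRing l) ++ [b] by simp]
        exact List.getLast?_concat
      rw [hlast]
      -- A side: pair abstraction, then the chain-gap fold
      rw [goA_eq_goPair (b :: l) [a0] 0 (by simp)]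
      rw [show pvGoPair (([a0] : List Int).headD 0) (([a0] : List Int).getLastD 0) (b :: l) 0
            = pvGoPair a0 a0 (b :: l) 0 from rfl]
      rw [goPair_eq_fold (b :: l) a0 a0 0 hpw'.tail
            (fun c hc => by simpa using List.rel_of_pairwise_cons hpw' hc)]
      simp only [min_self, max_self, pvGaps2, List.foldl]
      -- B side: the measuring loop folds the adjacent gaps of the ring
      rw [ringLoop_eq_fold]
      rw [show pvAdjGaps b (a0 :: pvRing l ++ [b])
            = |a0 - b| :: pvAdjGaps a0 (pvRing l ++ [b]) from rfl]
      simp only [List.foldl]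
      rw [abs_of_nonpos (by omega : a0 - b ≤ 0), neg_sub]
      rw [ring_gaps_eq l.length l le_rfl hpw'.tail.tail a0 b (max 0 (b - a0)) hab hbl
            (le_max_right _ _)]
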